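-- pv_equiv track=rewrite | github.com/mayazigdon/ErrorsFinder | main.py | find_errors_in_log
-- ===== SOURCE A (Python) =====
-- def find_errors_in_log(file_content:list, alarms_list)->str:
--     count=0
--     line_number = {}
--     lines_dict: dict ={}
--
--     #parsing file for 2 dicts
--     for line in file_content:
--         line = line.lower()
--         line = line.strip()
--         line = line.rsplit("]",1)
--         lines_dict[count]=line[-1]
--         line_number[count] = line[0]
--         count += 1
--
--     #looking up for any alarms in file
--     output: dict={}
--     number = ''
--     for alarm in alarms_list:
--         curr_line = []
--         output['key word: '+alarm]=["\n"]
--         for key, value in lines_dict.items():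
--             if alarm in value:
--                 number = line_number[key].rsplit(',', 1)
--                 number = number[-1]
--                 if number not in curr_line:
--                     output['key word: '+alarm].append(number+" --------------"+lines_dict[key]+"\n")
--                     curr_line.append(number)
--
--     return output
-- ===== SOURCE B (Python) =====
-- def find_errors_in_log(file_content: list, alarms_list) -> str:
--     # One streaming pass over the file with per-alarm dedup sets, instead of
--     # building int-keyed line tables and rescanning them once per alarm.
--     alarms = list(dict.fromkeys(alarms_list))  # distinct alarms, first-occurrence order
--     entries = {a: ["\n"] for a in alarms}
--     seen = {a: set() for a in alarms}
--     for line in file_content: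
--         part = line.lower().strip().rsplit("]", 1)
--         text = part[-1]
--         number = part[0].rsplit(",", 1)[-1]
--         for a in alarms:
--             if a in text and number not in seen[a]:
--                 entries[a].append(number + " --------------" + text + "\n")
--                 seen[a].add(number)
--     return {"key word: " + a: entries[a] for a in alarms}
-- ===== Notes on version B (the rewrite author's own statement) =====
-- stated objective: faster
-- what changed: Instead of building two int-keyed line tables and rescanning them once per alarm with a list-based dedup, B dedups the alarm list once, parses each line exactly once in a single streaming pass, and maintains a per-alarm seen-set (hash set) for dedup, assembling the output dict at the end.
import Mathlib
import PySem

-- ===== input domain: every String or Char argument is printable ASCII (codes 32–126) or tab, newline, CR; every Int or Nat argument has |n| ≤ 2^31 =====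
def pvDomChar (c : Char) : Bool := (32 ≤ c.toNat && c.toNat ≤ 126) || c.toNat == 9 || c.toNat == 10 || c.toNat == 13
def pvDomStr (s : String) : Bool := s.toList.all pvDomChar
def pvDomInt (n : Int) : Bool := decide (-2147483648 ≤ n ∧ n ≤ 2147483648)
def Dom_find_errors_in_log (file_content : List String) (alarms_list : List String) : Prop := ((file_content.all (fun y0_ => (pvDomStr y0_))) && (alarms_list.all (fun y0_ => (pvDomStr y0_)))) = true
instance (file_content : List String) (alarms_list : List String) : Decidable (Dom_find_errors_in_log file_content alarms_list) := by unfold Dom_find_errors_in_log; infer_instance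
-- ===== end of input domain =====

-- B streams each parsed line once with per-alarm seen-sets instead of A's int-keyed
-- line tables rescanned once per alarm with a list-scan dedup.

-- Exact port of Python `s.rsplit(sep, 1)` for a one-character separator, on code points
-- (hand-written: PySem has no rsplit): split at the LAST occurrence of `sep`, else `[s]`.
def pyRsplitOne (cs : List Char) (sep : Char) : List (List Char) :=
  match cs.reverse.findIdx? (fun c => c == sep) with
  | none => [cs]
  | some j => [cs.take (cs.length - 1 - j), cs.drop (cs.length - j)]


-- ===== PORT A =====
def find_errors_in_log (file_content : List String) (alarms_list : List String) : List (String × List String) :=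
  let st := file_content.foldl
    (fun (st : Int × PySem.Dict Int (List Char) × PySem.Dict Int (List Char)) line =>
      let l := pyRsplitOne (PySem.Str.strip (PySem.Str.lower line)).toList ']'
      (st.1 + 1, st.2.1.insert st.1 (l.headD []), st.2.2.insert st.1 (l.getLastD [])))
    (0, PySem.Dict.empty, PySem.Dict.empty)
  let line_number := st.2.1
  let lines_dict := st.2.2
  let output := alarms_list.foldl
    (fun (output : PySem.Dict String (List String)) alarm =>
      let key := String.ofList ("key word: ".toList ++ alarm.toList)
      let r := lines_dict.items.foldl
        (fun (st : PySem.Dict String (List String) × List (List Char)) kv =>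
          if PySem.Chars.isIn alarm.toList kv.2 then
            let number := (pyRsplitOne ((line_number.get? kv.1).getD []) ',').getLastD []
            if !(st.2.contains number) then
              (st.1.modify key [] (fun v =>
                 v ++ [String.ofList (number ++ (" --------------".toList ++ (kv.2 ++ ['\n'])))]),
               st.2 ++ [number])
            else st
          else st)
        (output.insert key ["\n"], ([] : List (List Char)))
      r.1)
    PySem.Dict.empty
  output.items


-- ===== PORT B =====
def find_errors_in_log_alt (file_content : List String) (alarms_list : List String) : List (String × List String) :=
  let alarms := PySem.List.dedup alarms_list
  let entries0 : PySem.Dict String (List String) :=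
    alarms.foldl (fun d a => d.insert a ["\n"]) PySem.Dict.empty
  let seen0 : PySem.Dict String (PySem.Set (List Char)) :=
    alarms.foldl (fun d a => d.insert a PySem.Set.empty) PySem.Dict.empty
  let st := file_content.foldl
    (fun (st : PySem.Dict String (List String) × PySem.Dict String (PySem.Set (List Char))) line =>
      let part := pyRsplitOne (PySem.Str.strip (PySem.Str.lower line)).toList ']'
      let text := part.getLastD []
      let number := (pyRsplitOne (part.headD []) ',').getLastD []
      alarms.foldl
        (fun st a =>
          if PySem.Chars.isIn a.toList text && !(PySem.Set.contains (st.2.getD a PySem.Set.empty) number) then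
            (st.1.modify a [] (fun v =>
               v ++ [String.ofList (number ++ (" --------------".toList ++ (text ++ ['\n'])))]),
             st.2.modify a PySem.Set.empty (fun s => PySem.Set.add s number))
          else st)
        st)
    (entries0, seen0)
  (alarms.foldl
    (fun (out : PySem.Dict String (List String)) a =>
      out.insert (String.ofList ("key word: ".toList ++ a.toList)) (st.1.getD a []))
    PySem.Dict.empty).items


-- ===== PRECONDITION & SPEC =====
def Spec_find_errors_in_log (file_content : List String) (alarms_list : List String) (out : List (String × List String)) : Prop := out = find_errors_in_log_alt file_content alarms_list
instance (file_content : List String) (alarms_list : List String) (out : List (String × List String)) : Decidable (Spec_find_errors_in_log file_content alarms_list out) := by unfold Spec_find_errors_in_log; infer_instance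

-- ===== CLAIM (what is proved, stated in full; the proofs are below) =====
def Claim_equal_find_errors_in_log : Prop := ∀ (file_content : List String) (alarms_list : List String), Dom_find_errors_in_log file_content alarms_list → Spec_find_errors_in_log file_content alarms_list (find_errors_in_log file_content alarms_list)

-- ===== LEMMAS AND PROOFS =====
def parse0 (line : String) : List Char × List Char :=
  let l := pyRsplitOne (PySem.Str.strip (PySem.Str.lower line)).toList ']'
  (l.headD [], l.getLastD [])

def numberOf (head : List Char) : List Char := (pyRsplitOne head ',').getLastD []

def entryStr (num text : List Char) : String :=
  String.ofList (num ++ (" --------------".toList ++ (text ++ ['\n'])))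

def keyOf (a : String) : String := String.ofList ("key word: ".toList ++ a.toList)

def runRef (a : List Char) (ps : List (List Char × List Char)) (acc : List String × List (List Char)) :
    List String × List (List Char) :=
  ps.foldl (fun st p =>
    if PySem.Chars.isIn a p.2 && !(st.2.contains (numberOf p.1)) then
      (st.1 ++ [entryStr (numberOf p.1) p.2], st.2 ++ [numberOf p.1])
    else st) acc

def enumFrom {α : Type} (c : Int) : List α → List (Int × α)
  | [] => []
  | p :: ps => (c, p) :: enumFrom (c + 1) ps

def stepA (st : Int × PySem.Dict Int (List Char) × PySem.Dict Int (List Char)) (line : String) :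
    Int × PySem.Dict Int (List Char) × PySem.Dict Int (List Char) :=
  let l := pyRsplitOne (PySem.Str.strip (PySem.Str.lower line)).toList ']'
  (st.1 + 1, st.2.1.insert st.1 (l.headD []), st.2.2.insert st.1 (l.getLastD []))

theorem stepA_eq (st : Int × PySem.Dict Int (List Char) × PySem.Dict Int (List Char)) (line : String) :
    stepA st line = (st.1 + 1, st.2.1.insert st.1 (parse0 line).1, st.2.2.insert st.1 (parse0 line).2) := by
  simp only [stepA, parse0]

theorem passA_spec (fc : List String) : ∀ (c : Int) (LN LD : PySem.Dict Int (List Char)),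
    (∀ k ∈ LD.keys, k < c) →
    ((fc.foldl stepA (c, LN, LD)).2.2.items
        = LD.items ++ (enumFrom c (fc.map parse0)).map (fun ip => (ip.1, ip.2.2)))
  ∧ (∀ k : Int, k < c → (fc.foldl stepA (c, LN, LD)).2.1.get? k = LN.get? k)
  ∧ (∀ ip ∈ enumFrom c (fc.map parse0), (fc.foldl stepA (c, LN, LD)).2.1.get? ip.1 = some ip.2.1) := by
  induction fc with
  | nil => intro c LN LD _; simp [enumFrom]
  | cons line fc ih =>
    intro c LN LD hLD
    have hfree : LD.contains c = false := by
      by_contra h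
      have : c ∈ LD.keys := (PySem.Dict.contains_iff_mem_keys LD c).mp (by
        cases hc : LD.contains c
        · exact absurd hc h
        · rfl)
      exact absurd (hLD c this) (by omega)
    have hLD' : ∀ k ∈ (LD.insert c (parse0 line).2).keys, k < c + 1 := by
      intro k hk
      rcases (PySem.Dict.mem_keys_insert LD c k (parse0 line).2).mp hk with h | h
      · omega
      · exact lt_trans (hLD k h) (by omega)
    obtain ⟨h1, h2, h3⟩ := ih (c + 1) (LN.insert c (parse0 line).1) (LD.insert c (parse0 line).2) hLD'
    rw [List.foldl_cons]
    rw [stepA_eq (c, LN, LD) line]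
    refine ⟨?_, ?_, ?_⟩
    · rw [h1, PySem.Dict.items_insert_of_not_contains LD (parse0 line).2 hfree]
      simp [enumFrom]
    · intro k hk
      rw [h2 k (by omega), PySem.Dict.get?_insert_of_ne _ _ (by omega : k ≠ c)]
    · intro ip hip
      simp only [List.map_cons, enumFrom, List.mem_cons] at hip
      rcases hip with rfl | h
      · rw [h2 c (by omega), PySem.Dict.get?_insert_self]
      · exact h3 ip h

def stepI (alarm key : String) (LN : PySem.Dict Int (List Char))
    (st : PySem.Dict String (List String) × List (List Char)) (kv : Int × List Char) :
    PySem.Dict String (List String) × List (List Char) :=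
  if PySem.Chars.isIn alarm.toList kv.2 then
    let number := (pyRsplitOne ((LN.get? kv.1).getD []) ',').getLastD []
    if !(st.2.contains number) then
      (st.1.modify key [] (fun v =>
        v ++ [String.ofList (number ++ (" --------------".toList ++ (kv.2 ++ ['\n'])))]),
       st.2 ++ [number])
    else st
  else st

theorem innerA_spec (alarm : String) (LN : PySem.Dict Int (List Char)) :
    ∀ (ps : List (List Char × List Char)) (c : Int) (out : PySem.Dict String (List String)) (curr : List (List Char)),
    (∀ ip ∈ enumFrom c ps, LN.get? ip.1 = some ip.2.1) →
    keyOf alarm ∈ out.keys →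
    (((enumFrom c ps).map (fun ip => (ip.1, ip.2.2))).foldl (stepI alarm (keyOf alarm) LN) (out, curr)).1.getD (keyOf alarm) []
        = (runRef alarm.toList ps (out.getD (keyOf alarm) [], curr)).1
  ∧ (((enumFrom c ps).map (fun ip => (ip.1, ip.2.2))).foldl (stepI alarm (keyOf alarm) LN) (out, curr)).2
        = (runRef alarm.toList ps (out.getD (keyOf alarm) [], curr)).2
  ∧ (∀ k, k ≠ keyOf alarm →
      (((enumFrom c ps).map (fun ip => (ip.1, ip.2.2))).foldl (stepI alarm (keyOf alarm) LN) (out, curr)).1.getD k []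
        = out.getD k [])
  ∧ (((enumFrom c ps).map (fun ip => (ip.1, ip.2.2))).foldl (stepI alarm (keyOf alarm) LN) (out, curr)).1.keys = out.keys := by
  intro ps
  induction ps with
  | nil => intro c out curr _ _; simp [enumFrom, runRef]
  | cons p ps ih =>
    intro c out curr hLN hkey
    have hc : LN.get? c = some p.1 := hLN (c, p) (by simp [enumFrom])
    have hnum : (pyRsplitOne ((LN.get? c).getD []) ',').getLastD [] = numberOf p.1 := by
      rw [hc]; rfl
    have hLN' : ∀ ip ∈ enumFrom (c + 1) ps, LN.get? ip.1 = some ip.2.1 := by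
      intro ip hip; exact hLN ip (by simp [enumFrom]; right; exact hip)
    simp only [enumFrom, List.map_cons, List.foldl_cons]
    have hrun : runRef alarm.toList (p :: ps) (out.getD (keyOf alarm) [], curr)
        = runRef alarm.toList ps
            (if PySem.Chars.isIn alarm.toList p.2 && !(curr.contains (numberOf p.1)) then
               (out.getD (keyOf alarm) [] ++ [entryStr (numberOf p.1) p.2], curr ++ [numberOf p.1])
             else (out.getD (keyOf alarm) [], curr)) := by
      simp only [runRef, List.foldl_cons]
    rw [hrun]
    by_cases hin : PySem.Chars.isIn alarm.toList p.2
    · by_cases hct : curr.contains (numberOf p.1)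
      · have hctm : (pyRsplitOne p.1 ',').getLast?.getD [] ∈ curr := by simpa [numberOf, List.getLastD_eq_getLast?] using hct
        have hstep : stepI alarm (keyOf alarm) LN (out, curr) (c, p.2) = (out, curr) := by
          simp [stepI, hin, hc, hctm]
        rw [hstep]
        simp only [hin, hct, Bool.not_true, Bool.and_false]
        exact ih (c + 1) out curr hLN' hkey
      · have hctm : (pyRsplitOne p.1 ',').getLast?.getD [] ∉ curr := by simpa [numberOf, List.getLastD_eq_getLast?] using hct
        have hstep : stepI alarm (keyOf alarm) LN (out, curr) (c, p.2)
            = (out.modify (keyOf alarm) [] (fun v => v ++ [entryStr (numberOf p.1) p.2]), curr ++ [numberOf p.1]) := by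
          simp [stepI, hin, hc, numberOf, hctm, entryStr, keyOf]
        rw [hstep]
        simp only [hin, hct, Bool.not_false, Bool.and_true, if_true]
        set out' := out.modify (keyOf alarm) [] (fun v => v ++ [entryStr (numberOf p.1) p.2]) with hout'
        have hkeys' : out'.keys = out.keys := by
          rw [hout', PySem.Dict.keys_modify,
            PySem.Dict.keys_insert_of_contains _ _ ((PySem.Dict.contains_iff_mem_keys _ _).mpr hkey)]
        have hself : out'.getD (keyOf alarm) [] = out.getD (keyOf alarm) [] ++ [entryStr (numberOf p.1) p.2] := by
          rw [hout', PySem.Dict.getD_modify_self]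
        have hother : ∀ k, k ≠ keyOf alarm → out'.getD k [] = out.getD k [] := by
          intro k hk
          rw [hout', PySem.Dict.getD_modify]
          simp [hk]
        obtain ⟨i1, i2, i3, i4⟩ := ih (c + 1) out' (curr ++ [numberOf p.1]) hLN' (hkeys' ▸ hkey)
        refine ⟨?_, ?_, ?_, ?_⟩
        · rw [i1, hself]
        · rw [i2, hself]
        · intro k hk; rw [i3 k hk, hother k hk]
        · rw [i4, hkeys']
    · have hstep : stepI alarm (keyOf alarm) LN (out, curr) (c, p.2) = (out, curr) := by
        simp [stepI, hin]
      rw [hstep]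
      simp only [hin, Bool.false_and]
      exact ih (c + 1) out curr hLN' hkey

theorem keyOf_injective : Function.Injective keyOf := by
  intro a b h
  have h2 := String.ofList_inj.mp h
  exact String.toList_inj.mp (List.append_cancel_left h2)

def stepO (LN : PySem.Dict Int (List Char)) (items : List (Int × List Char))
    (output : PySem.Dict String (List String)) (alarm : String) : PySem.Dict String (List String) :=
  let key := String.ofList ("key word: ".toList ++ alarm.toList)
  (items.foldl (stepI alarm key LN) (output.insert key ["\n"], ([] : List (List Char)))).1

theorem stepO_eq (LN : PySem.Dict Int (List Char)) (items : List (Int × List Char))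
    (output : PySem.Dict String (List String)) (alarm : String) :
    stepO LN items output alarm
      = (items.foldl (stepI alarm (keyOf alarm) LN)
          (output.insert (keyOf alarm) ["\n"], ([] : List (List Char)))).1 := by
  simp only [stepO, keyOf]

theorem outerA_spec (LN : PySem.Dict Int (List Char)) (ps : List (List Char × List Char))
    (hLN : ∀ ip ∈ enumFrom 0 ps, LN.get? ip.1 = some ip.2.1) :
    ∀ (al prev : List String) (out : PySem.Dict String (List String)),
    out.keys = (PySem.Set.ofList prev).map keyOf →
    (∀ a ∈ prev, out.getD (keyOf a) [] = (runRef a.toList ps (["\n"], [])).1) →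
    ((al.foldl (stepO LN ((enumFrom 0 ps).map (fun ip => (ip.1, ip.2.2)))) out).keys
        = (PySem.Set.ofList (prev ++ al)).map keyOf)
  ∧ (∀ a ∈ prev ++ al, (al.foldl (stepO LN ((enumFrom 0 ps).map (fun ip => (ip.1, ip.2.2)))) out).getD (keyOf a) []
        = (runRef a.toList ps (["\n"], [])).1) := by
  intro al
  induction al with
  | nil => intro prev out h1 h2; simpa using ⟨h1, h2⟩
  | cons alarm al ih =>
    intro prev out h1 h2
    rw [List.foldl_cons]
    obtain ⟨i1, i2, i3, i4⟩ := innerA_spec alarm LN ps 0 (out.insert (keyOf alarm) ["\n"]) [] hLN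
      ((PySem.Dict.mem_keys_insert _ _ _ _).mpr (Or.inl rfl))
    have houtkey : stepO LN ((enumFrom 0 ps).map (fun ip => (ip.1, ip.2.2))) out alarm
        = (((enumFrom 0 ps).map (fun ip => (ip.1, ip.2.2))).foldl (stepI alarm (keyOf alarm) LN)
            (out.insert (keyOf alarm) ["\n"], [])).1 := stepO_eq _ _ _ _
    have hself : (stepO LN ((enumFrom 0 ps).map (fun ip => (ip.1, ip.2.2))) out alarm).getD (keyOf alarm) []
        = (runRef alarm.toList ps (["\n"], [])).1 := by
      rw [houtkey, i1, PySem.Dict.getD_insert_self]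
    have hother : ∀ k, k ≠ keyOf alarm →
        (stepO LN ((enumFrom 0 ps).map (fun ip => (ip.1, ip.2.2))) out alarm).getD k [] = out.getD k [] := by
      intro k hk
      rw [houtkey, i3 k hk, PySem.Dict.getD_insert_of_ne _ _ _ hk]
    have hkeys : (stepO LN ((enumFrom 0 ps).map (fun ip => (ip.1, ip.2.2))) out alarm).keys
        = (PySem.Set.ofList (prev ++ [alarm])).map keyOf := by
      rw [houtkey, i4, PySem.Set.ofList_append_singleton]
      by_cases hmem : alarm ∈ prev
      · have hmem' : alarm ∈ PySem.Set.ofList prev := (PySem.Set.mem_ofList _ _).mpr hmem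
        rw [PySem.Dict.keys_insert_of_contains _ _ ((PySem.Dict.contains_iff_mem_keys _ _).mpr
          (by rw [h1]; exact List.mem_map_of_mem hmem')), h1,
          PySem.Set.add_of_mem hmem']
      · have hmem' : alarm ∉ PySem.Set.ofList prev := fun h => hmem ((PySem.Set.mem_ofList _ _).mp h)
        have hnc : out.contains (keyOf alarm) = false := by
          cases hc : out.contains (keyOf alarm)
          · rfl
          · exfalso
            have := (PySem.Dict.contains_iff_mem_keys _ _).mp hc
            rw [h1] at this
            obtain ⟨b, hb, hkb⟩ := List.mem_map.mp this
            exact hmem' (keyOf_injective hkb ▸ hb)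
        rw [PySem.Dict.keys_insert_of_not_contains _ _ hnc, h1, PySem.Set.add_of_not_mem hmem']
        simp
    have hgetD : ∀ a ∈ prev ++ [alarm],
        (stepO LN ((enumFrom 0 ps).map (fun ip => (ip.1, ip.2.2))) out alarm).getD (keyOf a) []
          = (runRef a.toList ps (["\n"], [])).1 := by
      intro a ha
      by_cases hak : a = alarm
      · subst hak; exact hself
      · have hne : keyOf a ≠ keyOf alarm := fun h => hak (keyOf_injective h)
        rw [hother _ hne]
        exact h2 a (by
          rcases List.mem_append.mp ha with h | h
          · exact h
          · exact absurd (List.mem_singleton.mp h) hak)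
    obtain ⟨o1, o2⟩ := ih (prev ++ [alarm]) _ hkeys hgetD
    constructor
    · rw [o1]; simp
    · intro a ha
      apply o2
      simp only [List.append_assoc, List.singleton_append]
      exact ha

theorem foldA_eq (fc : List String) :
    (fc.foldl (fun (st : Int × PySem.Dict Int (List Char) × PySem.Dict Int (List Char)) line =>
      let l := pyRsplitOne (PySem.Str.strip (PySem.Str.lower line)).toList ']'
      (st.1 + 1, st.2.1.insert st.1 (l.headD []), st.2.2.insert st.1 (l.getLastD [])))
      ((0 : Int), PySem.Dict.empty, PySem.Dict.empty))
    = fc.foldl stepA (0, PySem.Dict.empty, PySem.Dict.empty) := rfl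

theorem foldO_eq (al : List String) (LN : PySem.Dict Int (List Char)) (items : List (Int × List Char)) :
    (al.foldl
    (fun (output : PySem.Dict String (List String)) alarm =>
      let key := String.ofList ("key word: ".toList ++ alarm.toList)
      let r := items.foldl
        (fun (st : PySem.Dict String (List String) × List (List Char)) kv =>
          if PySem.Chars.isIn alarm.toList kv.2 then
            let number := (pyRsplitOne ((LN.get? kv.1).getD []) ',').getLastD []
            if !(st.2.contains number) then
              (st.1.modify key [] (fun v =>
                 v ++ [String.ofList (number ++ (" --------------".toList ++ (kv.2 ++ ['\n'])))]),
               st.2 ++ [number])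
            else st
          else st)
        (output.insert key ["\n"], ([] : List (List Char)))
      r.1)
    PySem.Dict.empty) = al.foldl (stepO LN items) PySem.Dict.empty := rfl

theorem A_bridge (fc al : List String) :
    find_errors_in_log fc al
      = ((al.foldl (stepO (fc.foldl stepA (0, PySem.Dict.empty, PySem.Dict.empty)).2.1
          ((fc.foldl stepA (0, PySem.Dict.empty, PySem.Dict.empty)).2.2.items)) PySem.Dict.empty)).items := by
  simp only [find_errors_in_log]
  rw [foldA_eq fc, foldO_eq al]

theorem A_items (fc al : List String) :
    find_errors_in_log fc al
      = (PySem.Set.ofList al).map (fun a => (keyOf a, (runRef a.toList (fc.map parse0) (["\n"], [])).1)) := by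
  obtain ⟨p1, p2, p3⟩ := passA_spec fc 0 PySem.Dict.empty PySem.Dict.empty (by simp [PySem.Dict.keys_empty])
  have hempty_items : (PySem.Dict.empty : PySem.Dict Int (List Char)).items = [] := rfl
  rw [hempty_items, List.nil_append] at p1
  have hO := outerA_spec _ (fc.map parse0) p3 al [] PySem.Dict.empty
    (by simp [PySem.Dict.keys_empty, PySem.Set.ofList_nil]) (by simp)
  rw [← p1] at hO
  obtain ⟨o1, o2⟩ := hO
  rw [A_bridge fc al]
  have hnodup : ((al.foldl (stepO (fc.foldl stepA (0, PySem.Dict.empty, PySem.Dict.empty)).2.1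
      ((fc.foldl stepA (0, PySem.Dict.empty, PySem.Dict.empty)).2.2.items)) PySem.Dict.empty)).keys.Nodup := by
    rw [o1]
    exact List.Nodup.map keyOf_injective (PySem.Set.nodup_ofList al)
  rw [PySem.Dict.items_eq_map_keys _ hnodup [], o1, List.map_map]
  refine List.map_congr_left ?_
  intro a ha
  simp only [Function.comp]
  rw [o2 a (by simpa using (PySem.Set.mem_ofList al a).mp ha)]

-- ===== B side =====
def stepBA (number text : List Char)
    (st : PySem.Dict String (List String) × PySem.Dict String (PySem.Set (List Char))) (a : String) :
    PySem.Dict String (List String) × PySem.Dict String (PySem.Set (List Char)) :=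
  if PySem.Chars.isIn a.toList text && !(PySem.Set.contains (st.2.getD a PySem.Set.empty) number) then
    (st.1.modify a [] (fun v =>
       v ++ [String.ofList (number ++ (" --------------".toList ++ (text ++ ['\n'])))]),
     st.2.modify a PySem.Set.empty (fun s => PySem.Set.add s number))
  else st

def stepB (alarms : List String)
    (st : PySem.Dict String (List String) × PySem.Dict String (PySem.Set (List Char))) (line : String) :
    PySem.Dict String (List String) × PySem.Dict String (PySem.Set (List Char)) :=
  alarms.foldl
    (stepBA ((pyRsplitOne ((pyRsplitOne (PySem.Str.strip (PySem.Str.lower line)).toList ']').headD []) ',').getLastD [])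
            ((pyRsplitOne (PySem.Str.strip (PySem.Str.lower line)).toList ']').getLastD [])) st

theorem stepB_eq (alarms : List String) st (line : String) :
    stepB alarms st line = alarms.foldl (stepBA (numberOf (parse0 line).1) (parse0 line).2) st := by
  simp only [stepB, parse0, numberOf]

def guardB (a : String) (number text : List Char)
    (sd : PySem.Dict String (PySem.Set (List Char))) : Bool :=
  PySem.Chars.isIn a.toList text && !(PySem.Set.contains (sd.getD a PySem.Set.empty) number)

theorem stepBA_getD_ne (number text : List Char) (st : _ × _) (a b : String) (hne : a ≠ b) :
    (stepBA number text st b).1.getD a [] = st.1.getD a []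
  ∧ (stepBA number text st b).2.getD a PySem.Set.empty = st.2.getD a PySem.Set.empty := by
  by_cases hg : PySem.Chars.isIn b.toList text && !(PySem.Set.contains (st.2.getD b PySem.Set.empty) number)
  · constructor
    · rw [stepBA, if_pos hg]
      rw [PySem.Dict.getD_modify]
      simp [hne]
    · rw [stepBA, if_pos hg]
      rw [PySem.Dict.getD_modify]
      simp [hne]
  · rw [stepBA, if_neg hg]
    exact ⟨rfl, rfl⟩

theorem stepBA_getD_self (number text : List Char) (st : _ × _) (b : String) :
    (stepBA number text st b).1.getD b []
        = (if guardB b number text st.2 then st.1.getD b [] ++ [entryStr number text] else st.1.getD b [])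
  ∧ (stepBA number text st b).2.getD b PySem.Set.empty
        = (if guardB b number text st.2 then PySem.Set.add (st.2.getD b PySem.Set.empty) number
           else st.2.getD b PySem.Set.empty) := by
  by_cases hg : PySem.Chars.isIn b.toList text && !(PySem.Set.contains (st.2.getD b PySem.Set.empty) number)
  · have hg' : guardB b number text st.2 = true := hg
    rw [stepBA, if_pos hg]
    constructor
    · rw [hg', if_pos rfl]
      have := PySem.Dict.getD_modify_self st.1 b []
        (fun v => v ++ [String.ofList (number ++ (" --------------".toList ++ (text ++ ['\n'])))])
      rw [this]
      rfl
    · rw [hg', if_pos rfl]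
      exact PySem.Dict.getD_modify_self st.2 b PySem.Set.empty (fun s => PySem.Set.add s number)
  · have hg' : guardB b number text st.2 = false := by
      simpa [guardB] using hg
    rw [stepBA, if_neg hg]
    rw [hg']
    simp

theorem innerB_spec (number text : List Char) :
    ∀ (al : List String), al.Nodup → ∀ st (a : String),
    (a ∈ al →
      ((al.foldl (stepBA number text) st).1.getD a []
          = (if guardB a number text st.2 then st.1.getD a [] ++ [entryStr number text] else st.1.getD a []))
    ∧ ((al.foldl (stepBA number text) st).2.getD a PySem.Set.empty
          = (if guardB a number text st.2 then PySem.Set.add (st.2.getD a PySem.Set.empty) number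
             else st.2.getD a PySem.Set.empty)))
  ∧ (a ∉ al →
      (al.foldl (stepBA number text) st).1.getD a [] = st.1.getD a []
    ∧ (al.foldl (stepBA number text) st).2.getD a PySem.Set.empty = st.2.getD a PySem.Set.empty) := by
  intro al
  induction al with
  | nil => intro _ st a; simp
  | cons b al ih =>
    intro hnd st a
    obtain ⟨hb, hnd'⟩ := List.nodup_cons.mp hnd
    rw [List.foldl_cons]
    constructor
    · intro ha
      rcases List.mem_cons.mp ha with rfl | ha'
      · -- a = b : later alarms leave key b alone
        have h2 := (ih hnd' (stepBA number text st a) a).2 hb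
        rw [h2.1, h2.2]
        exact stepBA_getD_self number text st a
      · have hab : a ≠ b := fun h => hb (h ▸ ha')
        have h3 := stepBA_getD_ne number text st a b hab
        have h1 := (ih hnd' (stepBA number text st b) a).1 ha'
        refine ⟨?_, ?_⟩
        · rw [h1.1]
          simp only [guardB, h3.2, h3.1]
          rfl
        · rw [h1.2]
          simp only [guardB, h3.2]
          rfl
    · intro ha
      have hab : a ≠ b := fun h => ha (h ▸ List.mem_cons_self)
      have h2 := (ih hnd' (stepBA number text st b) a).2 (fun h => ha (List.mem_cons_of_mem _ h))
      have h3 := stepBA_getD_ne number text st a b hab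
      rw [h2.1, h2.2, h3.1, h3.2]
      exact ⟨rfl, rfl⟩

theorem runRef_cons (a : List Char) (p : List Char × List Char) (ps : List (List Char × List Char))
    (acc : List String × List (List Char)) :
    runRef a (p :: ps) acc
      = runRef a ps (if PySem.Chars.isIn a p.2 && !(acc.2.contains (numberOf p.1)) then
          (acc.1 ++ [entryStr (numberOf p.1) p.2], acc.2 ++ [numberOf p.1]) else acc) := by
  simp only [runRef, List.foldl_cons]

theorem mainB_spec (alarms : List String) (hnd : alarms.Nodup) :
    ∀ (fc : List String) st (a : String), a ∈ alarms →
    ((fc.foldl (stepB alarms) st).1.getD a []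
        = (runRef a.toList (fc.map parse0) (st.1.getD a [], st.2.getD a PySem.Set.empty)).1)
  ∧ ((fc.foldl (stepB alarms) st).2.getD a PySem.Set.empty
        = (runRef a.toList (fc.map parse0) (st.1.getD a [], st.2.getD a PySem.Set.empty)).2) := by
  intro fc
  induction fc with
  | nil => intro st a _; simp [runRef]
  | cons line fc ih =>
    intro st a ha
    rw [List.foldl_cons, List.map_cons, stepB_eq, runRef_cons]
    have hin := (innerB_spec (numberOf (parse0 line).1) (parse0 line).2 alarms hnd st a).1 ha
    obtain ⟨ihs1, ihs2⟩ :=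
      ih (alarms.foldl (stepBA (numberOf (parse0 line).1) (parse0 line).2) st) a ha
    rw [ihs1, ihs2, hin.1, hin.2]
    have hmem : guardB a (numberOf (parse0 line).1) (parse0 line).2 st.2 = true →
        numberOf (parse0 line).1 ∉ st.2.getD a PySem.Set.empty := by
      intro hg hm
      have h2 := ((Bool.and_eq_true _ _).mp hg).2
      rw [(PySem.Set.contains_iff _ _).mpr hm] at h2
      simp at h2
    have harg : (if (PySem.Chars.isIn a.toList (parse0 line).2
            && !(List.contains (st.1.getD a [], st.2.getD a PySem.Set.empty).2 (numberOf (parse0 line).1))) = true then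
          ((st.1.getD a [], st.2.getD a PySem.Set.empty).1
              ++ [entryStr (numberOf (parse0 line).1) (parse0 line).2],
           (st.1.getD a [], st.2.getD a PySem.Set.empty).2 ++ [numberOf (parse0 line).1])
        else (st.1.getD a [], st.2.getD a PySem.Set.empty))
      = ((if guardB a (numberOf (parse0 line).1) (parse0 line).2 st.2 then
            st.1.getD a [] ++ [entryStr (numberOf (parse0 line).1) (parse0 line).2]
          else st.1.getD a []),
         (if guardB a (numberOf (parse0 line).1) (parse0 line).2 st.2 then
            PySem.Set.add (st.2.getD a PySem.Set.empty) (numberOf (parse0 line).1)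
          else st.2.getD a PySem.Set.empty)) := by
      by_cases hg : guardB a (numberOf (parse0 line).1) (parse0 line).2 st.2
      · rw [if_pos hg, if_pos hg, if_pos (by simpa [guardB] using hg),
          PySem.Set.add_of_not_mem (hmem hg)]
      · rw [if_neg hg, if_neg hg, if_neg (by simpa [guardB] using hg)]
    rw [harg]
    exact ⟨rfl, rfl⟩

theorem getD_foldl_insert_of_not_mem {ν : Type} (v : ν) (d0 : ν) :
    ∀ (al : List String) (d : PySem.Dict String ν) (a : String), a ∉ al →
    (al.foldl (fun d b => d.insert b v) d).getD a d0 = d.getD a d0 := by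
  intro al
  induction al with
  | nil => intro d a _; rfl
  | cons b al ih =>
    intro d a ha
    rw [List.foldl_cons, ih _ a (fun h => ha (List.mem_cons_of_mem _ h)),
      PySem.Dict.getD_insert_of_ne _ _ _ (fun h => ha (by rw [h]; exact List.mem_cons_self))]

theorem getD_foldl_insert_const {ν : Type} (v : ν) (d0 : ν) :
    ∀ (al : List String) (d : PySem.Dict String ν) (a : String), a ∈ al →
    (al.foldl (fun d b => d.insert b v) d).getD a d0 = v := by
  intro al
  induction al with
  | nil => intro d a ha; exact absurd ha (List.not_mem_nil)
  | cons b al ih =>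
    intro d a ha
    rw [List.foldl_cons]
    by_cases hmem : a ∈ al
    · exact ih _ a hmem
    · have hab : a = b := by
        rcases List.mem_cons.mp ha with h | h
        · exact h
        · exact absurd h hmem
      subst hab
      rw [getD_foldl_insert_of_not_mem v d0 al _ a hmem, PySem.Dict.getD_insert_self]

theorem B_bridge (fc al : List String) :
    find_errors_in_log_alt fc al
      = (((PySem.List.dedup al).foldl
          (fun (out : PySem.Dict String (List String)) a =>
            out.insert (keyOf a)
              ((fc.foldl (stepB (PySem.List.dedup al))
                  ((PySem.List.dedup al).foldl (fun d a => d.insert a ["\n"]) PySem.Dict.empty,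
                   (PySem.List.dedup al).foldl (fun d a => d.insert a PySem.Set.empty) PySem.Dict.empty)).1.getD a []))
          PySem.Dict.empty)).items := by
  simp only [find_errors_in_log_alt, keyOf]
  rfl

theorem B_items (fc al : List String) :
    find_errors_in_log_alt fc al
      = (PySem.List.dedup al).map
          (fun a => (keyOf a, (runRef a.toList (fc.map parse0) (["\n"], [])).1)) := by
  rw [B_bridge]
  have hnd : (PySem.List.dedup al).Nodup := PySem.Set.nodup_ofList al
  have hitems := PySem.Dict.items_foldl_insert_fresh (PySem.List.dedup al) keyOf
    (fun a => ((fc.foldl (stepB (PySem.List.dedup al))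
        ((PySem.List.dedup al).foldl (fun d a => d.insert a ["\n"]) PySem.Dict.empty,
         (PySem.List.dedup al).foldl (fun d a => d.insert a PySem.Set.empty) PySem.Dict.empty)).1.getD a []))
    PySem.Dict.empty (fun a _ => rfl) (List.Nodup.map keyOf_injective hnd)
  rw [hitems]
  rw [show (PySem.Dict.empty : PySem.Dict String (List String)).items = [] from rfl, List.nil_append]
  refine List.map_congr_left ?_
  intro a ha
  have hmain := (mainB_spec (PySem.List.dedup al) hnd fc
    ((PySem.List.dedup al).foldl (fun d a => d.insert a ["\n"]) PySem.Dict.empty,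
     (PySem.List.dedup al).foldl (fun d a => d.insert a PySem.Set.empty) PySem.Dict.empty) a ha).1
  have hE := getD_foldl_insert_const (["\n"] : List String) ([] : List String) (PySem.List.dedup al) PySem.Dict.empty a ha
  have hS := getD_foldl_insert_const (PySem.Set.empty : PySem.Set (List Char)) (PySem.Set.empty : PySem.Set (List Char)) (PySem.List.dedup al) PySem.Dict.empty a ha
  simp only [hmain, hE, hS]
  rfl

theorem AB_equal (fc al : List String) : find_errors_in_log fc al = find_errors_in_log_alt fc al := by
  rw [A_items, B_items]
  rfl

-- ===== VERDICT (by name: the statement is the Claim_ definition above) =====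
theorem find_errors_in_log_spec : Claim_equal_find_errors_in_log := by
  intro fc al _
  show _ = _
  exact AB_equal fc al
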